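-- pv_equiv track=rewrite | github.com/Lewall-theart/Audit_Tool | analyzers/attribute_extractor.py | _extract_audit_policy_stats
-- ===== SOURCE A (Python) =====
-- def _extract_audit_policy_stats(lines):
--     in_section = False
--     total = 0
--     enabled = 0
--     for line in lines:
--         stripped = line.strip()
--         lower = stripped.lower()
--         if "[+] list audit policy" in lower:
--             in_section = True
--             continue
--         if in_section and "iii.kiem tra cau hinh thiet bi" in lower:
--             break
--         if not in_section:
--             continue
--
--         status = None
--         if stripped.endswith("No Auditing"):
--             status = "no"
--         elif stripped.endswith("Success and Failure"):
--             status = "enabled"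
--         elif stripped.endswith("Success"):
--             status = "enabled"
--         elif stripped.endswith("Failure"):
--             status = "enabled"
--         if status is None:
--             continue
--         total += 1
--         if status == "enabled":
--             enabled += 1
--
--     if not in_section:
--         return None, None
--     return total, enabled
-- ===== SOURCE B (Python) =====
-- def _extract_audit_policy_stats(lines):
--     MARK = "[+] list audit policy"
--     STOP = "iii.kiem tra cau hinh thiet bi"
--     stripped = [line.strip() for line in lines]
--     idx = next((i for i, s in enumerate(stripped) if MARK in s.lower()), None)
--     if idx is None:
--         return None, None
--     section = stripped[idx + 1:]
--     stop = next((j for j, s in enumerate(section) if STOP in s.lower()), len(section))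
--     hits = [s for s in section[:stop]
--             if s.endswith(("No Auditing", "Success and Failure", "Success", "Failure"))]
--     return len(hits), sum(1 for s in hits if not s.endswith("No Auditing"))
-- ===== Notes on version B (the rewrite author's own statement) =====
-- stated objective: simpler
-- what changed: Replaces A's flag-driven accumulator loop by a phase decomposition (find the marker, slice the section up to the stop line, count hits with comprehensions); Pre_ excludes inputs where the marker substring occurs on more than one line, on which A's skip-every-marker-line behaviour is an accidental corner.
import Mathlib
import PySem

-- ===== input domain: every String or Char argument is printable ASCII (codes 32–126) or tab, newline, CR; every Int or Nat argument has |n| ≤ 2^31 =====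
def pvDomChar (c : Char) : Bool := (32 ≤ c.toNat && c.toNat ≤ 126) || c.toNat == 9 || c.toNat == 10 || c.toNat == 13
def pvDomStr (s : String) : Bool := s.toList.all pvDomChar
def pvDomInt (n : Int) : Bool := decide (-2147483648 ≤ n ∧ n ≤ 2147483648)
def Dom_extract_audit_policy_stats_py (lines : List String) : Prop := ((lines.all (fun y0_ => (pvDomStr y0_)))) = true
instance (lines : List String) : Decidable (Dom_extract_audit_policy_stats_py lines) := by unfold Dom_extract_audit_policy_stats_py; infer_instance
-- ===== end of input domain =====

-- Header: B replaces A's flag-driven accumulator loop by find-marker / slice-section / count phases; same cost, simpler decomposition.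

-- ===== PORT A =====
-- literal transliteration of A's loop: state (in_section, total, enabled); 'break' returns the state
def auditLoopA : List String → Bool → Int → Int → Bool × Int × Int
  | [], ins, t, e => (ins, t, e)
  | line :: rest, ins, t, e =>
    let stripped := PySem.Str.strip line
    let lower := PySem.Str.lower stripped
    if PySem.Str.isIn "[+] list audit policy" lower then
      auditLoopA rest true t e
    else if ins && PySem.Str.isIn "iii.kiem tra cau hinh thiet bi" lower then
      (ins, t, e)
    else if !ins then
      auditLoopA rest ins t e
    else
      let status : Option String :=
        if PySem.Str.endswith stripped "No Auditing" then some "no"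
        else if PySem.Str.endswith stripped "Success and Failure" then some "enabled"
        else if PySem.Str.endswith stripped "Success" then some "enabled"
        else if PySem.Str.endswith stripped "Failure" then some "enabled"
        else none
      match status with
      | none => auditLoopA rest ins t e
      | some st => auditLoopA rest ins (t + 1) (if st == "enabled" then e + 1 else e)

def extract_audit_policy_stats_py (lines : List String) : Option Int × Option Int :=
  match auditLoopA lines false 0 0 with
  | (ins, t, e) => if !ins then (none, none) else (some t, some e)

-- ===== PORT B =====
-- B's helper: the endswith(("No Auditing", "Success and Failure", "Success", "Failure")) test
def pvIsHit (s : String) : Bool :=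
  PySem.Str.endswith s "No Auditing" || PySem.Str.endswith s "Success and Failure"
    || PySem.Str.endswith s "Success" || PySem.Str.endswith s "Failure"

-- literal transliteration of Source B: strip all lines, find the marker index, slice to the stop line, count hits
def extract_audit_policy_stats_py_alt (lines : List String) : Option Int × Option Int :=
  let stripped := lines.map PySem.Str.strip
  match stripped.findIdx? (fun s => PySem.Str.isIn "[+] list audit policy" (PySem.Str.lower s)) with
  | none => (none, none)
  | some idx =>
    let sec := stripped.drop (idx + 1)
    let stop := (sec.findIdx? (fun s =>
        PySem.Str.isIn "iii.kiem tra cau hinh thiet bi" (PySem.Str.lower s))).getD sec.length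
    let hits := (sec.take stop).filter pvIsHit
    (some (hits.length : Int),
     some ((hits.filter (fun s => !PySem.Str.endswith s "No Auditing")).length : Int))

-- ===== PRECONDITION & SPEC =====
-- Pre_ excludes inputs where the marker substring occurs on more than one line: there A unconditionally
-- skips every such line (even inside the section, even when it would be a status or stop line), an
-- accidental corner of the flag loop that no caller would specify either way.
def Pre_extract_audit_policy_stats_py (lines : List String) : Prop :=
  lines.countP (fun line =>
    PySem.Str.isIn "[+] list audit policy" (PySem.Str.lower (PySem.Str.strip line))) ≤ 1

instance (lines : List String) : Decidable (Pre_extract_audit_policy_stats_py lines) := by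
  unfold Pre_extract_audit_policy_stats_py; infer_instance

def pvWitness_extract_audit_policy_stats_py : List String :=
  ["[+] List Audit Policy", "Logon  Success", "Logoff  No Auditing"]

def Spec_extract_audit_policy_stats_py (lines : List String) (out : Option Int × Option Int) : Prop := out = extract_audit_policy_stats_py_alt lines
instance (lines : List String) (out : Option Int × Option Int) : Decidable (Spec_extract_audit_policy_stats_py lines out) := by unfold Spec_extract_audit_policy_stats_py; infer_instance

-- ===== CLAIM (what is proved, stated in full; the proofs are below) =====
def Claim_equal_extract_audit_policy_stats_py : Prop := ∀ (lines : List String), Dom_extract_audit_policy_stats_py lines → Pre_extract_audit_policy_stats_py lines → Spec_extract_audit_policy_stats_py lines (extract_audit_policy_stats_py lines)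

-- ===== LEMMAS AND PROOFS =====

-- proof-side names for the per-line marker/stop tests and A's status chain
def pvIsMark (line : String) : Bool :=
  PySem.Str.isIn "[+] list audit policy" (PySem.Str.lower (PySem.Str.strip line))

def pvIsStop (line : String) : Bool :=
  PySem.Str.isIn "iii.kiem tra cau hinh thiet bi" (PySem.Str.lower (PySem.Str.strip line))

def pvChain (s : String) : Option String :=
  if PySem.Str.endswith s "No Auditing" then some "no"
  else if PySem.Str.endswith s "Success and Failure" then some "enabled"
  else if PySem.Str.endswith s "Success" then some "enabled"
  else if PySem.Str.endswith s "Failure" then some "enabled"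
  else none

def pvHits (rest : List String) : List String :=
  ((rest.takeWhile (fun l => !pvIsStop l)).map PySem.Str.strip).filter pvIsHit

lemma auditLoopA_cons (line : String) (rest : List String) (ins : Bool) (t e : Int) :
    auditLoopA (line :: rest) ins t e =
      if pvIsMark line then auditLoopA rest true t e
      else if ins && pvIsStop line then (ins, t, e)
      else if !ins then auditLoopA rest ins t e
      else
        match pvChain (PySem.Str.strip line) with
        | none => auditLoopA rest ins t e
        | some st => auditLoopA rest ins (t + 1) (if st == "enabled" then e + 1 else e) := by
  simp only [auditLoopA, pvIsMark, pvIsStop, pvChain]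

lemma pvChain_no (s : String) (h : PySem.Str.endswith s "No Auditing" = true) :
    pvChain s = some "no" := by
  unfold pvChain; rw [if_pos h]

lemma pvChain_none (s : String) (h : pvIsHit s = false) : pvChain s = none := by
  simp only [pvIsHit, Bool.or_eq_false_iff] at h
  obtain ⟨⟨⟨h1, h2⟩, h3⟩, h4⟩ := h
  unfold pvChain
  rw [if_neg (by rw [h1]; exact Bool.false_ne_true),
      if_neg (by rw [h2]; exact Bool.false_ne_true),
      if_neg (by rw [h3]; exact Bool.false_ne_true),
      if_neg (by rw [h4]; exact Bool.false_ne_true)]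

lemma pvChain_enabled (s : String) (hhit : pvIsHit s = true)
    (hno : PySem.Str.endswith s "No Auditing" = false) : pvChain s = some "enabled" := by
  unfold pvChain
  rw [if_neg (by rw [hno]; exact Bool.false_ne_true)]
  by_cases h2 : PySem.Str.endswith s "Success and Failure" = true
  · rw [if_pos h2]
  · rw [if_neg h2]
    by_cases h3 : PySem.Str.endswith s "Success" = true
    · rw [if_pos h3]
    · rw [if_neg h3]
      have h4 : PySem.Str.endswith s "Failure" = true := by
        simp only [pvIsHit, hno, Bool.false_or, Bool.or_eq_true] at hhit
        rcases hhit with (h | h) | h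
        · exact absurd h h2
        · exact absurd h h3
        · exact h
      rw [if_pos h4]

lemma take_findIdx_getD {α : Type} (p : α → Bool) (xs : List α) :
    xs.take ((xs.findIdx? p).getD xs.length) = xs.takeWhile (fun a => !p a) := by
  induction xs with
  | nil => simp
  | cons x xs ih =>
    by_cases h : p x
    · simp [List.findIdx?_cons, h]
    · simp only [List.findIdx?_cons, h, List.takeWhile_cons, Bool.not_false, if_true]
      cases hfi : xs.findIdx? p with
      | none => simpa [hfi] using ih
      | some j => simpa [hfi] using ih

-- A's loop after the marker, on a mark-free tail, adds the section counts
lemma auditLoopA_in_section (rest : List String) (hnm : ∀ l ∈ rest, pvIsMark l = false)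
    (t e : Int) :
    auditLoopA rest true t e =
      (true, t + (pvHits rest).length,
        e + ((pvHits rest).filter (fun s => !PySem.Str.endswith s "No Auditing")).length) := by
  induction rest generalizing t e with
  | nil => simp [auditLoopA, pvHits]
  | cons line rest ih =>
    have hm : pvIsMark line = false := hnm line (List.mem_cons_self ..)
    have hnm' : ∀ l ∈ rest, pvIsMark l = false := fun l hl => hnm l (List.mem_cons_of_mem _ hl)
    rw [auditLoopA_cons, if_neg (by rw [hm]; exact Bool.false_ne_true)]
    by_cases hst : pvIsStop line = true
    · rw [if_pos (by rw [hst]; decide)]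
      simp [pvHits, hst]
    · have hstF := Bool.eq_false_iff.mpr hst
      rw [if_neg (by rw [hstF]; simp), if_neg (by decide : ¬((!true) = true))]
      have hsec : pvHits (line :: rest) =
          if pvIsHit (PySem.Str.strip line) then PySem.Str.strip line :: pvHits rest
          else pvHits rest := by
        by_cases hh : pvIsHit (PySem.Str.strip line) = true <;> simp [pvHits, hstF, hh]
      by_cases hhit : pvIsHit (PySem.Str.strip line) = true
      · by_cases hno : PySem.Str.endswith (PySem.Str.strip line) "No Auditing" = true
        · rw [pvChain_no _ hno]
          show auditLoopA rest true (t + 1) e = _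
          rw [ih hnm', hsec, if_pos hhit, List.filter_cons]
          have hq : (!PySem.Str.endswith (PySem.Str.strip line) "No Auditing") = false := by
            rw [hno]; decide
          rw [hq, if_neg Bool.false_ne_true, List.length_cons]
          simp only [Prod.mk.injEq, true_and, and_true]
          first
          | (constructor <;> (push_cast; ring))
          | (push_cast; ring)
        · have hno' := Bool.eq_false_iff.mpr hno
          rw [pvChain_enabled _ hhit hno']
          show auditLoopA rest true (t + 1) (e + 1) = _
          rw [ih hnm', hsec, if_pos hhit, List.filter_cons]
          have hq : (!PySem.Str.endswith (PySem.Str.strip line) "No Auditing") = true := by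
            rw [hno']; decide
          rw [hq, if_pos rfl, List.length_cons, List.length_cons]
          simp only [Prod.mk.injEq, true_and, and_true]
          first
          | (constructor <;> (push_cast; ring))
          | (push_cast; ring)
      · rw [pvChain_none _ (Bool.eq_false_iff.mpr hhit)]
        show auditLoopA rest true t e = _
        rw [ih hnm', hsec, if_neg hhit]

-- the takeWhile/filter phase of B computed on the stripped list equals pvHits on the raw list
lemma pvHits_map (rest : List String) :
    ((rest.map PySem.Str.strip).takeWhile (fun s =>
        !PySem.Str.isIn "iii.kiem tra cau hinh thiet bi" (PySem.Str.lower s))).filter pvIsHit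
      = pvHits rest := by
  rw [List.takeWhile_map]
  simp only [pvHits, pvIsStop, Function.comp_def]

-- equality of the two ports under the single-marker precondition
lemma ports_eq (lines : List String)
    (hpre : lines.countP pvIsMark ≤ 1) :
    extract_audit_policy_stats_py lines = extract_audit_policy_stats_py_alt lines := by
  induction lines with
  | nil => rfl
  | cons line rest ih =>
    by_cases hm : pvIsMark line = true
    · have hcnt : rest.countP pvIsMark = 0 := by
        rw [List.countP_cons, if_pos hm] at hpre; omega
      have hnm : ∀ l ∈ rest, pvIsMark l = false := by
        intro l hl
        have := (List.countP_eq_zero.mp hcnt) l hl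
        exact Bool.eq_false_iff.mpr (by simpa using this)
      have hA : extract_audit_policy_stats_py (line :: rest) =
          match auditLoopA rest true 0 0 with
          | (ins, t, e) => if !ins then (none, none) else (some t, some e) := by
        unfold extract_audit_policy_stats_py
        rw [auditLoopA_cons, if_pos hm]
      rw [hA, auditLoopA_in_section rest hnm]
      have hmB : PySem.Str.isIn "[+] list audit policy"
          (PySem.Str.lower (PySem.Str.strip line)) = true := hm
      simp only [extract_audit_policy_stats_py_alt, List.map_cons, List.findIdx?_cons, hmB,
        if_true, Bool.not_true]
      rw [List.drop_succ_cons, List.drop_zero, take_findIdx_getD, pvHits_map]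
      simp
    · have hm' : pvIsMark line = false := Bool.eq_false_iff.mpr hm
      have hpre' : rest.countP pvIsMark ≤ 1 := by
        rw [List.countP_cons, if_neg (by rw [hm']; exact Bool.false_ne_true)] at hpre
        omega
      have hA : extract_audit_policy_stats_py (line :: rest) =
          extract_audit_policy_stats_py rest := by
        unfold extract_audit_policy_stats_py
        rw [auditLoopA_cons, if_neg hm]
        simp only [Bool.false_and]
        rw [if_neg Bool.false_ne_true, if_pos (by decide : (!false) = true)]
      rw [hA, ih hpre']
      have hmB : PySem.Str.isIn "[+] list audit policy"
          (PySem.Str.lower (PySem.Str.strip line)) = false := hm'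
      simp only [extract_audit_policy_stats_py_alt, List.map_cons, List.findIdx?_cons, hmB]
      cases hfi : (rest.map PySem.Str.strip).findIdx? (fun s =>
          PySem.Str.isIn "[+] list audit policy" (PySem.Str.lower s)) with
      | none => simp
      | some j => simp [List.drop_succ_cons]

-- ===== VERDICT (by name: the statement is the Claim_ definition above) =====
theorem extract_audit_policy_stats_py_spec : Claim_equal_extract_audit_policy_stats_py :=
  fun lines _ hpre => ports_eq lines hpre
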